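-- pv_equiv track=rewrite | github.com/HosungYou/ScholarGraph3D | backend/auth/policies.py | get_auth_level
-- ===== SOURCE A (Python) =====
-- import fnmatch
-- from enum import Enum
-- from typing import List, Set, Tuple
--
-- class AuthLevel(str, Enum):
--     NONE = "none"
--     OPTIONAL = "optional"
--     REQUIRED = "required"
--
-- PUBLIC_PATHS: Set[str] = {
--     "/",
--     "/health",
--     "/docs",
--     "/openapi.json",
--     "/redoc",
-- }
--
-- AUTH_POLICIES: List[Tuple[str, AuthLevel]] = [
--     # Auth routes — no auth for login/signup
--     ("/api/auth/signup", AuthLevel.NONE),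
--     ("/api/auth/login", AuthLevel.NONE),
--     ("/api/auth/refresh", AuthLevel.NONE),
--     ("/api/auth/me", AuthLevel.REQUIRED),
--     ("/api/auth/logout", AuthLevel.REQUIRED),
--
--     # Search and papers — public access
--     ("/api/search", AuthLevel.NONE),
--     ("/api/papers", AuthLevel.NONE),
--     ("/api/papers/*", AuthLevel.NONE),
--
--     # Graphs — require authentication
--     ("/api/graphs", AuthLevel.REQUIRED),
--     ("/api/graphs/*", AuthLevel.REQUIRED),
-- ]
--
-- def _match_pattern(pattern: str, path: str) -> bool:
--     if pattern == path:
--         return True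
--     if pattern.endswith("/*"):
--         prefix = pattern[:-1]
--         if path.startswith(prefix) or path == prefix[:-1]:
--             return True
--     if "*" in pattern:
--         return fnmatch.fnmatch(path, pattern)
--     return False
--
-- def get_auth_level(path: str) -> AuthLevel:
--     """Get the authentication level required for a given path."""
--     path = path.rstrip("/")
--     if not path:
--         path = "/"
--
--     if path in PUBLIC_PATHS:
--         return AuthLevel.NONE
--
--     best_match = None
--     best_specificity = -1
--
--     for pattern, level in AUTH_POLICIES:
--         if _match_pattern(pattern, path):
--             specificity = len(pattern) - pattern.count("*") * 5
--             if specificity > best_specificity: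
--                 best_specificity = specificity
--                 best_match = level
--
--     if best_match is not None:
--         return best_match
--
--     return AuthLevel.OPTIONAL
-- ===== SOURCE B (Python) =====
-- from enum import Enum
-- from typing import Dict, List, Set, Tuple
--
-- class AuthLevel(str, Enum):
--     NONE = "none"
--     OPTIONAL = "optional"
--     REQUIRED = "required"
--
-- PUBLIC_PATHS: Set[str] = {
--     "/",
--     "/health",
--     "/docs",
--     "/openapi.json",
--     "/redoc",
-- }
--
-- AUTH_POLICIES: List[Tuple[str, AuthLevel]] = [
--     ("/api/auth/signup", AuthLevel.NONE),
--     ("/api/auth/login", AuthLevel.NONE),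
--     ("/api/auth/refresh", AuthLevel.NONE),
--     ("/api/auth/me", AuthLevel.REQUIRED),
--     ("/api/auth/logout", AuthLevel.REQUIRED),
--     ("/api/search", AuthLevel.NONE),
--     ("/api/papers", AuthLevel.NONE),
--     ("/api/papers/*", AuthLevel.NONE),
--     ("/api/graphs", AuthLevel.REQUIRED),
--     ("/api/graphs/*", AuthLevel.REQUIRED),
-- ]
--
-- # The policy table is split once, at import time: literal patterns become a
-- # dict for O(1) exact lookup, and each "<base>/*" pattern becomes the prefix
-- # "<base>/" that a sub-path must start with.
-- _EXACT: Dict[str, AuthLevel] = {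
--     pattern: level for pattern, level in AUTH_POLICIES if "*" not in pattern
-- }
-- _PREFIXES: List[Tuple[str, AuthLevel]] = [
--     (pattern[:-1], level) for pattern, level in AUTH_POLICIES if pattern.endswith("/*")
-- ]
--
-- def get_auth_level(path: str) -> AuthLevel:
--     """Get the authentication level required for a given path."""
--     path = path.rstrip("/") or "/"
--
--     if path in PUBLIC_PATHS:
--         return AuthLevel.NONE
--
--     level = _EXACT.get(path)
--     if level is not None:
--         return level
--
--     for prefix, level in _PREFIXES:
--         if path.startswith(prefix):
--             return level
--
--     return AuthLevel.OPTIONAL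
-- ===== Notes on version B (the rewrite author's own statement) =====
-- stated objective: faster
-- what changed: Replaces A's per-call scan over all patterns with running max-specificity tracking (calling a glob matcher per pattern) by a one-time import-time split of the policy table into an exact-path dict and a list of prefixes, so a call is one dict lookup plus at most two startswith checks, with no specificity arithmetic and no fnmatch.
import Mathlib
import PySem

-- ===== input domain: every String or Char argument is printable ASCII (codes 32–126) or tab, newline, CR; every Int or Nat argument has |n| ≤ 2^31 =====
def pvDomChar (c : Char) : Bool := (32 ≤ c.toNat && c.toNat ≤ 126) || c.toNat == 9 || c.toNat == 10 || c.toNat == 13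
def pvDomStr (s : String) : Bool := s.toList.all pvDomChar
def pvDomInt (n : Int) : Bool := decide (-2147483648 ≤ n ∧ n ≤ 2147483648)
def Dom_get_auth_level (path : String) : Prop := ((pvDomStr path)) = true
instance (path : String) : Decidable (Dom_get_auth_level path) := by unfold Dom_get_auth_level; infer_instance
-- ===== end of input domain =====

-- B splits the policy table once at import time into an exact-path dict and a list of "<base>/"
-- prefixes, replacing A's per-call glob-matching scan with running max-specificity tracking
-- (objective: faster per call — one dict lookup plus two prefix checks).

-- ===== PORT A =====
-- shared module constants (identical lines in both Pythons)

def PUBLIC_PATHS : PySem.Set String :=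
  PySem.Set.ofList ["/", "/health", "/docs", "/openapi.json", "/redoc"]

def AUTH_POLICIES : List (String × String) :=
  [("/api/auth/signup", "none"),
   ("/api/auth/login", "none"),
   ("/api/auth/refresh", "none"),
   ("/api/auth/me", "required"),
   ("/api/auth/logout", "required"),
   ("/api/search", "none"),
   ("/api/papers", "none"),
   ("/api/papers/*", "none"),
   ("/api/graphs", "required"),
   ("/api/graphs/*", "required")]

-- path.rstrip("/") — hand port of str.rstrip with an explicit chars argument (exact)
def pvRstripSlash (s : String) : String :=
  String.ofList ((s.toList.reverse.dropWhile (fun c => c == '/')).reverse)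

-- fnmatch.fnmatch (POSIX, case-sensitive): hand-ported glob matcher; exact for patterns whose
-- only glob metacharacter is '*' — true of every pattern in AUTH_POLICIES ('?' and '[' absent).
-- (fuel = |pattern| + |path| + 1 strictly bounds the recursion depth, so it never runs out)
def pvGlobF : Nat → List Char → List Char → Bool
  | 0, _, _ => false
  | _ + 1, [], s => s.isEmpty
  | f + 1, c :: ps, s =>
    if c = '*' then
      pvGlobF f ps s ||
        (match s with
         | [] => false
         | _ :: s' => pvGlobF f (c :: ps) s')
    else
      match s with
      | [] => false
      | d :: s' => c == d && pvGlobF f ps s'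

def pvFnmatch (path pattern : String) : Bool :=
  pvGlobF (pattern.toList.length + path.toList.length + 1) pattern.toList path.toList

-- _match_pattern, transliterated (A's helper)
def pv_match_pattern (pattern path : String) : Bool :=
  if pattern == path then true
  else
    let b2 : Bool :=
      if PySem.Str.endswith pattern "/*" then
        let pre := PySem.Str.slice pattern none (some (-1))        -- pattern[:-1]
        PySem.Str.startswith path pre ||
          path == PySem.Str.slice pre none (some (-1))             -- prefix[:-1]
      else false
    if b2 then true
    else if PySem.Str.isIn "*" pattern then pvFnmatch path pattern
    else false

def get_auth_level (path : String) : String :=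
  let p0 := pvRstripSlash path
  let p := if p0 == "" then "/" else p0
  if PySem.Set.contains PUBLIC_PATHS p then "none"
  else
    let r :=
      AUTH_POLICIES.foldl
        (fun (st : Option String × Int) pl =>
          if pv_match_pattern pl.1 p then
            let spec : Int := (PySem.Str.len pl.1 : Int) - (PySem.Str.count pl.1 "*" : Int) * 5
            if spec > st.2 then (some pl.2, spec) else st
          else st)
        (none, -1)
    match r.1 with
    | some lvl => lvl
    | none => "optional"

-- ===== PORT B =====
-- _EXACT = {pattern: level for pattern, level in AUTH_POLICIES if "*" not in pattern}
def EXACT_POLICIES : PySem.Dict String String :=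
  PySem.Dict.ofList (AUTH_POLICIES.filter (fun pl => !(PySem.Str.isIn "*" pl.1)))

-- _PREFIXES = [(pattern[:-1], level) for pattern, level in AUTH_POLICIES if pattern.endswith("/*")]
def PREFIX_POLICIES : List (String × String) :=
  (AUTH_POLICIES.filter (fun pl => PySem.Str.endswith pl.1 "/*")).map
    (fun pl => (PySem.Str.slice pl.1 none (some (-1)), pl.2))

def get_auth_level_alt (path : String) : String :=
  let p0 := pvRstripSlash path                -- path.rstrip("/") or "/"
  let p := if p0 == "" then "/" else p0
  if PySem.Set.contains PUBLIC_PATHS p then "none"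
  else
    match PySem.Dict.get? EXACT_POLICIES p with
    | some lvl => lvl
    | none =>
      match PREFIX_POLICIES.find? (fun pl => PySem.Str.startswith p pl.1) with
      | some pl => pl.2
      | none => "optional"

-- ===== PRECONDITION & SPEC =====
def Spec_get_auth_level (path : String) (out : String) : Prop := out = get_auth_level_alt path
instance (path : String) (out : String) : Decidable (Spec_get_auth_level path out) := by unfold Spec_get_auth_level; infer_instance

-- ===== CLAIM =====
def Claim_equal_get_auth_level : Prop := ∀ (path : String), Dom_get_auth_level path → Spec_get_auth_level path (get_auth_level path)

-- ===== LEMMAS AND PROOFS =====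

-- proof-only interpreter of A's running-max chain over (match?, specificity, level) triples
def pvStepA (st : Option String × Int) (b : Bool) (spec : Int) (lvl : String) : Option String × Int :=
  if b then (if spec > st.2 then (some lvl, spec) else st) else st

def pvChainA : List (Bool × Int × String) → (Option String × Int) → Option String × Int
  | [], st => st
  | (b, spec, lvl) :: rest, st => pvChainA rest (pvStepA st b spec lvl)

lemma pv_foldA (p : String) (l : List (String × String)) (st : Option String × Int) :
    l.foldl
      (fun (st : Option String × Int) pl =>
        if pv_match_pattern pl.1 p then
          let spec : Int := (PySem.Str.len pl.1 : Int) - (PySem.Str.count pl.1 "*" : Int) * 5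
          if spec > st.2 then (some pl.2, spec) else st
        else st) st
    = pvChainA (l.map (fun pl =>
        (pv_match_pattern pl.1 p,
         (PySem.Str.len pl.1 : Int) - (PySem.Str.count pl.1 "*" : Int) * 5, pl.2))) st := by
  induction l generalizing st with
  | nil => rfl
  | cons a t ih => simp only [List.foldl_cons, List.map_cons, pvChainA, pvStepA, ih]

-- '*' matches any suffix (given enough fuel)
lemma pvGlob_star (fuel : Nat) (s : List Char) (hf : s.length + 2 ≤ fuel) :
    pvGlobF fuel ['*'] s = true := by
  induction fuel generalizing s with
  | zero => omega
  | succ f ih =>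
    cases s with
    | nil =>
      have : 1 ≤ f := by omega
      obtain ⟨f', rfl⟩ : ∃ f', f = f' + 1 := ⟨f - 1, by omega⟩
      simp [pvGlobF]
    | cons d s' =>
      have : s'.length + 2 ≤ f := by simpa using hf
      simp [pvGlobF, ih s' this]

-- a literal prefix followed by a single trailing '*' is exactly a startswith test
lemma pvGlob_lit_star (cs : List Char) (h : '*' ∉ cs) (s : List Char) (fuel : Nat)
    (hf : cs.length + s.length + 2 ≤ fuel) :
    pvGlobF fuel (cs ++ ['*']) s = cs.isPrefixOf s := by
  induction cs generalizing s fuel with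
  | nil => simpa using pvGlob_star fuel s (by simpa using hf)
  | cons c cs' ih =>
    have hc : c ≠ '*' := fun hc => h (hc ▸ List.mem_cons_self)
    have h' : '*' ∉ cs' := fun hm => h (List.mem_cons_of_mem _ hm)
    obtain ⟨f, rfl⟩ : ∃ f, fuel = f + 1 := ⟨fuel - 1, by omega⟩
    cases s with
    | nil => simp [pvGlobF, hc]
    | cons d s' =>
      have : cs'.length + s'.length + 2 ≤ f := by
        simp at hf; omega
      simp [pvGlobF, hc, List.isPrefixOf, ih h' s' f this]

lemma startswith_eq_isPrefixOf (p pre : String) :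
    PySem.Str.startswith p pre = pre.toList.isPrefixOf p.toList := by
  rw [Bool.eq_iff_iff, PySem.Str.startswith_eq, PySem.Chars.startswith_iff,
      List.isPrefixOf_iff_prefix]

-- pv_match_pattern at each concrete policy pattern, as a function of generic p
lemma mp_exact (pat : String) (hstar : PySem.Str.isIn "*" pat = false)
    (hsl : PySem.Str.endswith pat "/*" = false) (p : String) :
    pv_match_pattern pat p = (pat == p) := by
  unfold pv_match_pattern
  cases h : pat == p
  · simp only [Bool.false_eq_true, if_false, hsl, hstar]
  · simp

lemma mp_wild (pat pre base : String)
    (hpat : pat.toList = pre.toList ++ ['*']) (hstar : '*' ∉ pre.toList)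
    (hsl : PySem.Str.endswith pat "/*" = true)
    (hin : PySem.Str.isIn "*" pat = true)
    (hslice : PySem.Str.slice pat none (some (-1)) = pre)
    (hslice2 : PySem.Str.slice pre none (some (-1)) = base)
    (hself : PySem.Str.startswith pat pre = true) (p : String) :
    pv_match_pattern pat p = (PySem.Str.startswith p pre || base == p) := by
  unfold pv_match_pattern
  cases h : pat == p with
  | true =>
    have heq : pat = p := by simpa using h
    subst heq
    simp only [if_true, hself, Bool.true_or]
  | false =>
    simp only [if_false, Bool.false_eq_true, hsl, if_true, hslice, hslice2]
    rw [show (p == base) = (base == p) from Bool.beq_comm]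
    cases hb2 : (PySem.Str.startswith p pre || base == p) with
    | true => simp
    | false =>
      simp only [Bool.false_eq_true, if_false, hin, if_true]
      have hsw : PySem.Str.startswith p pre = false := by
        rcases Bool.or_eq_false_iff.mp hb2 with ⟨h1, _⟩; exact h1
      unfold pvFnmatch
      rw [hpat, pvGlob_lit_star pre.toList hstar p.toList _
            (by simp [List.length_append])]
      rw [startswith_eq_isPrefixOf] at hsw
      exact hsw

-- B's helpers evaluate to literals
lemma exact_policies_eq :
    EXACT_POLICIES = PySem.Dict.mk
      [("/api/auth/signup", "none"), ("/api/auth/login", "none"),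
       ("/api/auth/refresh", "none"), ("/api/auth/me", "required"),
       ("/api/auth/logout", "required"), ("/api/search", "none"),
       ("/api/papers", "none"), ("/api/graphs", "required")] := by
  decide

lemma prefix_policies_eq :
    PREFIX_POLICIES = [("/api/papers/", "none"), ("/api/graphs/", "required")] := by
  decide

-- the heart of the claim: A's running-max fold over AUTH_POLICIES and B's dict-then-prefix
-- lookup agree for every outcome of the exact-equality and prefix tests
lemma core_eq (p : String) :
    (match
        (AUTH_POLICIES.foldl
          (fun (st : Option String × Int) pl =>
            if pv_match_pattern pl.1 p then
              let spec : Int := (PySem.Str.len pl.1 : Int) - (PySem.Str.count pl.1 "*" : Int) * 5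
              if spec > st.2 then (some pl.2, spec) else st
            else st)
          (none, -1)).1 with
      | some lvl => lvl
      | none => "optional") =
    (match PySem.Dict.get? EXACT_POLICIES p with
      | some lvl => lvl
      | none =>
        match PREFIX_POLICIES.find? (fun pl => PySem.Str.startswith p pl.1) with
        | some pl => pl.2
        | none => "optional") := by
  by_cases h1 : ("/api/auth/signup" : String) = p
  · subst h1; decide
  by_cases h2 : ("/api/auth/login" : String) = p
  · subst h2; decide
  by_cases h3 : ("/api/auth/refresh" : String) = p
  · subst h3; decide
  by_cases h4 : ("/api/auth/me" : String) = p
  · subst h4; decide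
  by_cases h5 : ("/api/auth/logout" : String) = p
  · subst h5; decide
  by_cases h6 : ("/api/search" : String) = p
  · subst h6; decide
  by_cases h7 : ("/api/papers" : String) = p
  · subst h7; decide
  by_cases h8 : ("/api/graphs" : String) = p
  · subst h8; decide
  rw [pv_foldA, exact_policies_eq, prefix_policies_eq]
  simp only [AUTH_POLICIES, List.map_cons, List.map_nil]
  rw [mp_exact "/api/auth/signup" (by decide) (by decide),
      mp_exact "/api/auth/login" (by decide) (by decide),
      mp_exact "/api/auth/refresh" (by decide) (by decide),
      mp_exact "/api/auth/me" (by decide) (by decide),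
      mp_exact "/api/auth/logout" (by decide) (by decide),
      mp_exact "/api/search" (by decide) (by decide),
      mp_exact "/api/papers" (by decide) (by decide),
      mp_exact "/api/graphs" (by decide) (by decide),
      mp_wild "/api/papers/*" "/api/papers/" "/api/papers" (by decide) (by decide)
        (by decide) (by decide) (by decide) (by decide) (by decide),
      mp_wild "/api/graphs/*" "/api/graphs/" "/api/graphs" (by decide) (by decide)
        (by decide) (by decide) (by decide) (by decide) (by decide)]
  simp only [show (PySem.Str.len "/api/auth/signup" : Int) - (PySem.Str.count "/api/auth/signup" "*" : Int) * 5 = 16 from by decide,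
             show (PySem.Str.len "/api/auth/login" : Int) - (PySem.Str.count "/api/auth/login" "*" : Int) * 5 = 15 from by decide,
             show (PySem.Str.len "/api/auth/refresh" : Int) - (PySem.Str.count "/api/auth/refresh" "*" : Int) * 5 = 17 from by decide,
             show (PySem.Str.len "/api/auth/me" : Int) - (PySem.Str.count "/api/auth/me" "*" : Int) * 5 = 12 from by decide,
             show (PySem.Str.len "/api/auth/logout" : Int) - (PySem.Str.count "/api/auth/logout" "*" : Int) * 5 = 16 from by decide,
             show (PySem.Str.len "/api/search" : Int) - (PySem.Str.count "/api/search" "*" : Int) * 5 = 11 from by decide,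
             show (PySem.Str.len "/api/papers" : Int) - (PySem.Str.count "/api/papers" "*" : Int) * 5 = 11 from by decide,
             show (PySem.Str.len "/api/papers/*" : Int) - (PySem.Str.count "/api/papers/*" "*" : Int) * 5 = 8 from by decide,
             show (PySem.Str.len "/api/graphs" : Int) - (PySem.Str.count "/api/graphs" "*" : Int) * 5 = 11 from by decide,
             show (PySem.Str.len "/api/graphs/*" : Int) - (PySem.Str.count "/api/graphs/*" "*" : Int) * 5 = 8 from by decide]
  simp only [PySem.Dict.get?_mk_cons, List.find?,
    show (PySem.Dict.mk ([] : List (String × String))).get? p = none from rfl]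
  simp only [beq_eq_false_iff_ne.mpr h1, beq_eq_false_iff_ne.mpr h2,
    beq_eq_false_iff_ne.mpr h3, beq_eq_false_iff_ne.mpr h4, beq_eq_false_iff_ne.mpr h5,
    beq_eq_false_iff_ne.mpr h6, beq_eq_false_iff_ne.mpr h7, beq_eq_false_iff_ne.mpr h8]
  generalize PySem.Str.startswith p "/api/papers/" = w1
  generalize PySem.Str.startswith p "/api/graphs/" = w2
  revert w1 w2
  decide

-- ===== VERDICT (by name: the statement is the Claim_ definition above) =====
theorem get_auth_level_spec : Claim_equal_get_auth_level := by
  intro path _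
  unfold Spec_get_auth_level get_auth_level get_auth_level_alt
  by_cases h : PySem.Set.contains PUBLIC_PATHS
      (if pvRstripSlash path == "" then "/" else pvRstripSlash path) = true
  · simp only [h, if_pos]
  · simp only [Bool.not_eq_true] at h
    simp only [h, Bool.false_eq_true, if_false]
    exact core_eq _
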